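-- pv_equiv track=rewrite | github.com/Catherinesjkim/cs-module-project-hash-tables | applications/expensive_seq/expensive_seq.py | expensive_seq
-- ===== SOURCE A (Python) =====
-- def expensive_seq(x, y, z):
--     if x <= 0:
--         return y + z
--     return (
--         expensive_seq(x - 1, y + 1, z)
--         + expensive_seq(x - 2, y + 2, z * 2)
--         + expensive_seq(x - 3, y + 3, z * 3)
--     )
-- ===== SOURCE B (Python) =====
-- def expensive_seq(x, y, z):
--     # Linearity: expensive_seq(x,y,z) = a(x)*y + b(x) + m(x)*z, where a,b,m obey
--     # three-term linear recurrences; compute them bottom-up in O(x).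
--     if x <= 0:
--         return y + z
--     a0 = a1 = a2 = 1
--     b0 = b1 = b2 = 0
--     m0 = m1 = m2 = 1
--     for _ in range(x):
--         na = a2 + a1 + a0
--         nb = (b2 + a2) + (b1 + 2 * a1) + (b0 + 3 * a0)
--         nm = m2 + 2 * m1 + 3 * m0
--         a0, a1, a2 = a1, a2, na
--         b0, b1, b2 = b1, b2, nb
--         m0, m1, m2 = m1, m2, nm
--     return a2 * y + b2 + m2 * z
-- ===== Notes on version B (the rewrite author's own statement) =====
-- stated objective: alternative
-- what changed: Replaces the triple recursion by a bottom-up computation of three linear recurrences (the coefficient of y, the constant term, and the coefficient of z), exploiting that the result is affine in y and z; Pre_ excludes x >= 9000, where Python A never returns a value (its depth-x recursion raises RecursionError at the interpreter's stack limit, and below that the exponential-time recursion cannot be evaluated) -- the equivalence lemmas themselves hold for all x.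
import Mathlib
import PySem

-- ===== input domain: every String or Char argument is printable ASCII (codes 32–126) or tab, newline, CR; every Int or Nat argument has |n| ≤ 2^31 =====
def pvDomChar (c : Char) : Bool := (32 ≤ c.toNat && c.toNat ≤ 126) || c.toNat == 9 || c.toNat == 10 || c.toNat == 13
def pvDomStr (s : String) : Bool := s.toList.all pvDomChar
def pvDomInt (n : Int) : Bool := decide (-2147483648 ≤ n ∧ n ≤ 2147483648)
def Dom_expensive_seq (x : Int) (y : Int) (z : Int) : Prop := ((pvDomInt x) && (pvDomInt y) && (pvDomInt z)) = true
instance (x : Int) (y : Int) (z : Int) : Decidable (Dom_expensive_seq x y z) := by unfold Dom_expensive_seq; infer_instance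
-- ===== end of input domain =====

-- B computes the same value bottom-up via three linear recurrences (the result is affine in y and z) instead of A's triple recursion.

-- ===== PORT A =====
def expensive_seq (x : Int) (y : Int) (z : Int) : Int :=
  if x ≤ 0 then y + z
  else
    expensive_seq (x - 1) (y + 1) z
    + expensive_seq (x - 2) (y + 2) (z * 2)
    + expensive_seq (x - 3) (y + 3) (z * 3)
termination_by x.toNat
decreasing_by all_goals omega

-- ===== PORT B =====
-- loop body of Source B: state (a0,a1,a2,b0,b1,b2,m0,m1,m2)
def esStep (s : Int × Int × Int × Int × Int × Int × Int × Int × Int) :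
    Int × Int × Int × Int × Int × Int × Int × Int × Int :=
  match s with
  | (a0, a1, a2, b0, b1, b2, m0, m1, m2) =>
    (a1, a2, a2 + a1 + a0,
     b1, b2, (b2 + a2) + (b1 + 2 * a1) + (b0 + 3 * a0),
     m1, m2, m2 + 2 * m1 + 3 * m0)

def expensive_seq_alt (x : Int) (y : Int) (z : Int) : Int :=
  if x ≤ 0 then y + z
  else
    match (List.range x.toNat).foldl (fun s _ => esStep s) (1, 1, 1, 0, 0, 0, 1, 1, 1) with
    | (_, _, a2, _, _, b2, _, _, m2) => a2 * y + b2 + m2 * z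

-- ===== PRECONDITION & SPEC =====
-- Pre_ excludes x >= 9000: there Python A never returns a value -- its recursion has depth x,
-- so it overflows the interpreter's call stack (RecursionError) once x reaches the recursion
-- limit, and below that bound in the excluded region its 3^x-time recursion cannot be evaluated;
-- the equivalence lemmas below hold for all x, the proof nowhere uses this bound.
def Pre_expensive_seq (x : Int) (_y : Int) (_z : Int) : Prop := x < 9000
instance (x : Int) (y : Int) (z : Int) : Decidable (Pre_expensive_seq x y z) := by unfold Pre_expensive_seq; infer_instance
def pvWitness_expensive_seq : Int × Int × Int := (5, 3, 2)

def Spec_expensive_seq (x : Int) (y : Int) (z : Int) (out : Int) : Prop := out = expensive_seq_alt x y z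
instance (x : Int) (y : Int) (z : Int) (out : Int) : Decidable (Spec_expensive_seq x y z out) := by unfold Spec_expensive_seq; infer_instance

-- ===== CLAIM (what is proved, stated in full; the proofs are below) =====
def Claim_equal_expensive_seq : Prop := ∀ (x : Int) (y : Int) (z : Int), Dom_expensive_seq x y z → Pre_expensive_seq x y z → Spec_expensive_seq x y z (expensive_seq x y z)

-- ===== LEMMAS AND PROOFS =====

-- the three linear recurrences, as Nat functions (values at indices ≤ 0 are constant,
-- so truncated Nat subtraction matches the Int recursion)
def fa : Nat → Int
  | 0 => 1
  | (k+1) => fa k + fa (k-1) + fa (k-2)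

def fb : Nat → Int
  | 0 => 0
  | (k+1) => (fb k + fa k) + (fb (k-1) + 2 * fa (k-1)) + (fb (k-2) + 3 * fa (k-2))

def fm : Nat → Int
  | 0 => 1
  | (k+1) => fm k + 2 * fm (k-1) + 3 * fm (k-2)

-- closed form of A
theorem expensive_seq_closed (x y z : Int) :
    expensive_seq x y z = fa x.toNat * y + fb x.toNat + fm x.toNat * z := by
  induction hn : x.toNat using Nat.strong_induction_on generalizing x y z with
  | _ n ih =>
    by_cases hx : x ≤ 0
    · have h0 : n = 0 := by omega
      subst h0
      rw [expensive_seq, if_pos hx]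
      simp [fa, fb, fm]
    · obtain ⟨k, hk⟩ := Nat.exists_eq_succ_of_ne_zero (show n ≠ 0 by omega)
      have e1 : (x - 1).toNat = k := by omega
      have e2 : (x - 2).toNat = k - 1 := by omega
      have e3 : (x - 3).toNat = k - 2 := by omega
      rw [expensive_seq, if_neg hx,
          ih ((x - 1).toNat) (by omega) _ _ _ rfl,
          ih ((x - 2).toNat) (by omega) _ _ _ rfl,
          ih ((x - 3).toNat) (by omega) _ _ _ rfl,
          e1, e2, e3, hk, fa, fb, fm]
      ring

-- foldl invariant for B's loop
theorem esStep_foldl (n : Nat) :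
    (List.range n).foldl (fun s _ => esStep s) (1, 1, 1, 0, 0, 0, 1, 1, 1)
      = (fa (n-2), fa (n-1), fa n, fb (n-2), fb (n-1), fb n, fm (n-2), fm (n-1), fm n) := by
  induction n with
  | zero => simp [fa, fb, fm]
  | succ k ih =>
    rw [List.range_succ, List.foldl_append, ih]
    simp only [List.foldl_cons, List.foldl_nil, esStep]
    have h1 : k + 1 - 2 = k - 1 := by omega
    have h2 : k + 1 - 1 = k := by omega
    rw [h1, h2, fa, fb, fm]

-- closed form of B
theorem expensive_seq_alt_closed (x y z : Int) :
    expensive_seq_alt x y z = fa x.toNat * y + fb x.toNat + fm x.toNat * z := by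
  by_cases hx : x ≤ 0
  · have h0 : x.toNat = 0 := by omega
    rw [expensive_seq_alt, if_pos hx, h0]
    simp [fa, fb, fm]
  · rw [expensive_seq_alt, if_neg hx, esStep_foldl]

-- ===== VERDICT (by name: the statement is the Claim_ definition above) =====
theorem expensive_seq_spec : Claim_equal_expensive_seq := by
  intro x y z _ _
  unfold Spec_expensive_seq
  rw [expensive_seq_closed, expensive_seq_alt_closed]
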